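-- pv_equiv track=rewrite | github.com/websitetalkingheadsvideo/rifftrax | renamer_mapping_common.py | resolve_newrel_for_repo_rel
-- ===== SOURCE A (Python) =====
-- def norm(s: str) -> str:
--     return "".join(c.lower() for c in s if not c.isspace())
--
-- def resolve_newrel_for_repo_rel(
--     rel_under_root: str,
--     path_norm_to_newrel: dict[str, str],
-- ) -> str | None:
--     """Try rel, then drop leading path segments until norm(rel) hits the map."""
--     rel_s = rel_under_root.replace("/", "\\")
--     parts = rel_s.split("\\")
--     for i in range(0, len(parts)):
--         candidate = "\\".join(parts[i:])
--         k = norm(candidate)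
--         if k in path_norm_to_newrel:
--             return path_norm_to_newrel[k]
--     return None
-- ===== SOURCE B (Python) =====
-- def norm(s: str) -> str:
--     return "".join(c.lower() for c in s if not c.isspace())
--
--
-- def resolve_newrel_for_repo_rel(rel_under_root, path_norm_to_newrel):
--     # Scan the MAP instead of the path: normalize the whole path once, record the
--     # normalized offset of every segment boundary, and for each map key test in O(1)+
--     # whether it is the normalized suffix starting at some boundary; the longest
--     # matching key corresponds to dropping the fewest leading segments.
--     parts = rel_under_root.replace("/", "\\").split("\\")
--     full = norm("\\".join(parts))
--     bounds = set()
--     pos = 0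
--     for p in parts:
--         bounds.add(pos)
--         pos += len(norm(p)) + 1
--     best = None  # (key length, value); a longer matching key keeps more segments
--     for k, v in path_norm_to_newrel.items():
--         if len(full) - len(k) in bounds and full.endswith(k):
--             if best is None or len(k) > best[0]:
--                 best = (len(k), v)
--     return best[1] if best is not None else None
-- ===== Notes on version B (the rewrite author's own statement) =====
-- stated objective: alternative
-- what changed: A iterates over path suffixes, re-joining and re-normalizing each remainder and probing the dict per suffix; B instead iterates over the dict once: it normalizes the whole path a single time, precomputes the set of normalized segment-boundary offsets, tests each map key by length-offset membership plus one endswith, and keeps the longest matching key (which is exactly the fewest-segments-dropped suffix).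
import Mathlib
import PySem

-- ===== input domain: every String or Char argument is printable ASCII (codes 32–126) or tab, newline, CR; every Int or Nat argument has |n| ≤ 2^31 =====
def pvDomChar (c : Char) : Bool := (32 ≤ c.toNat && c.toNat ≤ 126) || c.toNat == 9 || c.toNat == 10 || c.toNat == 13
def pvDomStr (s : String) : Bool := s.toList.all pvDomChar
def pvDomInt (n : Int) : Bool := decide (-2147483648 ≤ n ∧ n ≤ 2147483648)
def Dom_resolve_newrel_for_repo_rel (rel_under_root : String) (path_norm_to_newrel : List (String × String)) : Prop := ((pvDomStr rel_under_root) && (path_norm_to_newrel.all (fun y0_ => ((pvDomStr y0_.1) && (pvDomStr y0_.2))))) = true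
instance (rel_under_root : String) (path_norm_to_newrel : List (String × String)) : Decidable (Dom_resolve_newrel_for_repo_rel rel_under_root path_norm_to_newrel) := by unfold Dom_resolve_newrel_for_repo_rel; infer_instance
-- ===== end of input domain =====

-- B scans the MAP instead of the path: it normalizes the whole path once, records the set of
-- normalized segment-boundary offsets, tests each map key by offset membership + endswith, and
-- keeps the longest matching key — instead of A's per-suffix re-join/re-normalize/dict-probe.

-- ===== PORT A =====
-- norm(s) = "".join(c.lower() for c in s if not c.isspace())   (shared verbatim by Source A and Source B)
def pvNorm (cs : List Char) : List Char :=
  PySem.Chars.join [] (((cs.filter (fun c => !PySem.Chars.isspace c)).map (fun c => PySem.Chars.lower [c])))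

-- the for-i-in-range loop of A, with early return on a dict hit
def pvLoopA (parts : List (List Char)) (d : List (String × String)) : List Int → Option String
  | [] => none
  | i :: is =>
    let candidate := PySem.Chars.join ['\\'] (PySem.List.slice parts (some i) none)
    let k := pvNorm candidate
    if d.any (fun q => q.1.toList == k) then
      (d.find? (fun q => q.1.toList == k)).map (·.2)
    else pvLoopA parts d is

def resolve_newrel_for_repo_rel (rel_under_root : String) (path_norm_to_newrel : List (String × String)) : Option String :=
  let rel_s := PySem.Chars.replace rel_under_root.toList ['/'] ['\\']
  let parts := PySem.Chars.splitOn rel_s ['\\']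
  pvLoopA parts path_norm_to_newrel (PySem.List.pyRange 0 (parts.length : Int) 1)

-- ===== PORT B =====
def resolve_newrel_for_repo_rel_alt (rel_under_root : String) (path_norm_to_newrel : List (String × String)) : Option String :=
  let parts := PySem.Chars.splitOn (PySem.Chars.replace rel_under_root.toList ['/'] ['\\']) ['\\']
  let full := pvNorm (PySem.Chars.join ['\\'] parts)
  -- bounds = set(); pos = 0; for p in parts: bounds.add(pos); pos += len(norm(p)) + 1
  let bounds := (parts.foldl
      (fun (st : Int × PySem.Set Int) p =>
        (st.1 + ((pvNorm p).length : Int) + 1, PySem.Set.add st.2 st.1))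
      ((0 : Int), PySem.Set.empty)).2
  -- best = None; for k, v in items: if len(full)-len(k) in bounds and full.endswith(k): …
  let best := path_norm_to_newrel.foldl
      (fun (best : Option (Int × String)) kv =>
        if ((full.length : Int) - (kv.1.toList.length : Int)) ∈ bounds
            ∧ PySem.Chars.endswith full kv.1.toList = true then
          match best with
          | none => some ((kv.1.toList.length : Int), kv.2)
          | some (b, u) =>
            if (kv.1.toList.length : Int) > b then some ((kv.1.toList.length : Int), kv.2)
            else some (b, u)
        else best)
      none
  best.map (·.2)

-- ===== PRECONDITION & SPEC =====
def Spec_resolve_newrel_for_repo_rel (rel_under_root : String) (path_norm_to_newrel : List (String × String)) (out : Option String) : Prop := out = resolve_newrel_for_repo_rel_alt rel_under_root path_norm_to_newrel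
instance (rel_under_root : String) (path_norm_to_newrel : List (String × String)) (out : Option String) : Decidable (Spec_resolve_newrel_for_repo_rel rel_under_root path_norm_to_newrel out) := by unfold Spec_resolve_newrel_for_repo_rel; infer_instance

-- ===== CLAIM (what is proved, stated in full; the proofs are below) =====
def Claim_equal_resolve_newrel_for_repo_rel : Prop := ∀ (rel_under_root : String) (path_norm_to_newrel : List (String × String)), Dom_resolve_newrel_for_repo_rel rel_under_root path_norm_to_newrel → Spec_resolve_newrel_for_repo_rel rel_under_root path_norm_to_newrel (resolve_newrel_for_repo_rel rel_under_root path_norm_to_newrel)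

-- ===== LEMMAS AND PROOFS =====

-- the normalized nonempty suffixes of `parts`, longest first (the reference value both sides reach)
def pvSuffixKeys : List (List Char) → List (List Char)
  | [] => []
  | p :: rest => pvNorm (PySem.Chars.join ['\\'] (p :: rest)) :: pvSuffixKeys rest

-- the boundary offsets B's first loop inserts, in order
def pvBoundsList : List (List Char) → Int → List Int
  | [], _ => []
  | p :: rest, pos => pos :: pvBoundsList rest (pos + ((pvNorm p).length : Int) + 1)

-- reference search over the suffix list: first key present in the dict (first entry wins)
def pvGet (d : List (String × String)) (k : List Char) : Option String :=
  (d.find? (fun q => q.1.toList == k)).map (·.2)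

def pvFindB (d : List (String × String)) : List (List Char) → Option String
  | [] => none
  | k :: ks =>
    match pvGet d k with
    | some v => some v
    | none => pvFindB d ks

-- "keep the longest, first on ties" combiner of B's second loop (left argument is earlier)
def pvMerge (a c : Option (Int × String)) : Option (Int × String) :=
  match c with
  | none => a
  | some (l, v) =>
    match a with
    | none => some (l, v)
    | some (b, u) => if l > b then some (l, v) else some (b, u)

def pvFM (c : String × String → Option (Int × String)) : List (String × String) → Option (Int × String)
  | [] => none
  | e :: es => pvMerge (c e) (pvFM c es)

-- B's candidate for one dict entry, phrased by membership in a key list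
def pvCandS (ss : List (List Char)) (kv : String × String) : Option (Int × String) :=
  if kv.1.toList ∈ ss then some ((kv.1.toList.length : Int), kv.2) else none

theorem pvNorm_eq (cs : List Char) :
    pvNorm cs = (cs.filter (fun c => !PySem.Chars.isspace c)).map PySem.Chars.lowerChar := by
  unfold pvNorm
  have h : (cs.filter (fun c => !PySem.Chars.isspace c)).map (fun c => PySem.Chars.lower [c])
      = ((cs.filter (fun c => !PySem.Chars.isspace c)).map PySem.Chars.lowerChar).map (fun c => [c]) := by
    simp [List.map_map, PySem.Chars.lower, Function.comp]
  rw [h, PySem.Chars.join_nil_singletons]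

theorem pvNorm_append (a b : List Char) : pvNorm (a ++ b) = pvNorm a ++ pvNorm b := by
  simp [pvNorm_eq, List.filter_append]

theorem pvNorm_backslash : pvNorm ['\\'] = ['\\'] := by decide

-- A's index loop, started at any index i, searches the keys of the dropped suffix
theorem pvLoopA_eq (parts : List (List Char)) (d : List (String × String)) (i : Nat) :
    pvLoopA parts d (PySem.List.pyRange (i : Int) (parts.length : Int) 1)
      = pvFindB d (pvSuffixKeys (parts.drop i)) := by
  by_cases h : i < parts.length
  · rw [PySem.List.pyRange_one_cons (by exact_mod_cast h)]
    have hdrop : parts.drop i = parts[i] :: parts.drop (i + 1) :=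
      (List.drop_eq_getElem_cons h)
    simp only [pvLoopA]
    rw [show ((i : Int) + 1) = ((i + 1 : Nat) : Int) from by push_cast; ring]
    rw [pvLoopA_eq parts d (i + 1)]
    rw [PySem.List.slice_from_natCast]
    rw [hdrop]
    simp only [pvSuffixKeys, pvFindB]
    set K := pvNorm (PySem.Chars.join ['\\'] (parts[i] :: parts.drop (i + 1))) with hK
    simp only [pvGet]
    rcases hfind : List.find? (fun r => r.1.toList == K) d with _ | u
    · have hany : d.any (fun r => r.1.toList == K) = false := by
        rw [List.any_eq_false]; intro x hx; exact List.find?_eq_none.mp hfind x hx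
      simp [hany, hfind]
    · have hpu := List.find?_some hfind
      have hany : d.any (fun r => r.1.toList == K) = true := by
        rw [List.any_eq_true]; exact ⟨u, List.mem_of_find?_eq_some hfind, hpu⟩
      simp [hany, hfind]
  · rw [PySem.List.pyRange_one_eq_nil (by exact_mod_cast Nat.le_of_not_lt h)]
    rw [List.drop_eq_nil_of_le (Nat.le_of_not_lt h)]
    rfl
termination_by parts.length - i

-- lengths of the two proof lists
theorem length_pvSuffixKeys (l : List (List Char)) : (pvSuffixKeys l).length = l.length := by
  induction l with
  | nil => rfl
  | cons p rest ih => simp [pvSuffixKeys, ih]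

theorem length_pvBoundsList (l : List (List Char)) (pos : Int) :
    (pvBoundsList l pos).length = l.length := by
  induction l generalizing pos with
  | nil => rfl
  | cons p rest ih => simp [pvBoundsList, ih]

-- positional identity: offset j + length of suffix key j = pos + length of the full key
theorem pvBounds_add_len (l : List (List Char)) (pos : Int) (j : Nat)
    (hj : j < l.length) :
    (pvBoundsList l pos)[j]'(by rw [length_pvBoundsList]; exact hj)
      + (((pvSuffixKeys l)[j]'(by rw [length_pvSuffixKeys]; exact hj)).length : Int)
      = pos + ((pvNorm (PySem.Chars.join ['\\'] l)).length : Int) := by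
  induction l generalizing pos j with
  | nil => exact absurd hj (by simp)
  | cons p rest ih =>
    cases j with
    | zero => simp [pvBoundsList, pvSuffixKeys]
    | succ j =>
      have hj' : j < rest.length := by simpa using hj
      rcases rest with _ | ⟨q, rs⟩
      · exact absurd hj' (by simp)
      · have := ih (pos + ((pvNorm p).length : Int) + 1) j hj'
        simp only [pvBoundsList, pvSuffixKeys, List.getElem_cons_succ] at this ⊢
        rw [this, PySem.Chars.join_cons_cons, List.append_assoc, pvNorm_append,
          pvNorm_append, pvNorm_backslash]
        simp only [List.length_append, List.length_cons, List.singleton_append]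
        push_cast
        ring

-- every suffix key is a suffix of the full normalized path
theorem pvSuffixKeys_suffix (l : List (List Char)) (k : List Char)
    (hk : k ∈ pvSuffixKeys l) : k <:+ pvNorm (PySem.Chars.join ['\\'] l) := by
  induction l with
  | nil => exact absurd hk (by simp [pvSuffixKeys])
  | cons p rest ih =>
    rcases List.mem_cons.mp hk with h | h
    · exact h ▸ List.suffix_refl _
    · rcases rest with _ | ⟨q, rs⟩
      · exact absurd h (by simp [pvSuffixKeys])
      · refine (ih h).trans ?_
        rw [PySem.Chars.join_cons_cons, List.append_assoc, pvNorm_append, pvNorm_append]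
        exact (List.suffix_append _ _).trans (List.suffix_append _ _)

-- suffix keys have strictly decreasing lengths
theorem pvSuffixKeys_pairwise (l : List (List Char)) :
    (pvSuffixKeys l).Pairwise (fun a b => b.length < a.length) := by
  induction l with
  | nil => exact List.Pairwise.nil
  | cons p rest ih =>
    rw [pvSuffixKeys, List.pairwise_cons]
    refine ⟨fun k' hk' => ?_, ih⟩
    rcases rest with _ | ⟨q, rs⟩
    · exact absurd hk' (by simp [pvSuffixKeys])
    · have hle : k'.length ≤ (pvNorm (PySem.Chars.join ['\\'] (q :: rs))).length :=
        (pvSuffixKeys_suffix _ _ hk').length_le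
      rw [PySem.Chars.join_cons_cons, List.append_assoc, pvNorm_append, pvNorm_append,
        pvNorm_backslash]
      simp only [List.length_append, List.singleton_append, List.length_cons]
      omega

-- membership in B's bounds set after the first loop
theorem pvBoundsFold_mem (l : List (List Char)) (pos : Int) (s : PySem.Set Int) (o : Int) :
    o ∈ (l.foldl
      (fun (st : Int × PySem.Set Int) p =>
        (st.1 + ((pvNorm p).length : Int) + 1, PySem.Set.add st.2 st.1)) (pos, s)).2
    ↔ o ∈ s ∨ o ∈ pvBoundsList l pos := by
  induction l generalizing pos s with
  | nil => simp [pvBoundsList]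
  | cons p rest ih =>
    rw [List.foldl_cons, ih]
    rw [PySem.Set.mem_add]
    simp [pvBoundsList]
    tauto

-- the match test of B is exactly "k is one of the normalized suffixes"
theorem pvMatch_iff (parts : List (List Char)) (k : List Char) :
    ((((pvNorm (PySem.Chars.join ['\\'] parts)).length : Int) - (k.length : Int))
        ∈ pvBoundsList parts 0
      ∧ PySem.Chars.endswith (pvNorm (PySem.Chars.join ['\\'] parts)) k = true)
    ↔ k ∈ pvSuffixKeys parts := by
  constructor
  · rintro ⟨hmem, hend⟩
    obtain ⟨j, hj, hval⟩ := List.getElem_of_mem hmem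
    rw [length_pvBoundsList] at hj
    have hadd := pvBounds_add_len parts 0 j hj
    rw [hval] at hadd
    have hsufk : k <:+ pvNorm (PySem.Chars.join ['\\'] parts) :=
      (PySem.Chars.endswith_iff _ _).mp hend
    have hsufj : (pvSuffixKeys parts)[j]'(by rw [length_pvSuffixKeys]; exact hj)
        <:+ pvNorm (PySem.Chars.join ['\\'] parts) :=
      pvSuffixKeys_suffix _ _ (List.getElem_mem _)
    have hlen : k.length = ((pvSuffixKeys parts)[j]'(by rw [length_pvSuffixKeys]; exact hj)).length := by
      omega
    have hkeq : k = (pvSuffixKeys parts)[j]'(by rw [length_pvSuffixKeys]; exact hj) := by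
      obtain ⟨t, ht⟩ := hsufk
      obtain ⟨t', ht'⟩ := hsufj
      have hlt : t.length = t'.length := by
        have h1 := congrArg List.length ht
        have h2 := congrArg List.length ht'
        simp only [List.length_append] at h1 h2
        omega
      exact List.append_inj_right (ht.trans ht'.symm) hlt
    exact hkeq ▸ List.getElem_mem _
  · intro hk
    obtain ⟨j, hj, hval⟩ := List.getElem_of_mem hk
    rw [length_pvSuffixKeys] at hj
    have hadd := pvBounds_add_len parts 0 j hj
    constructor
    · have : ((pvNorm (PySem.Chars.join ['\\'] parts)).length : Int) - (k.length : Int)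
          = (pvBoundsList parts 0)[j]'(by rw [length_pvBoundsList]; exact hj) := by
        rw [hval] at hadd
        omega
      rw [this]
      exact List.getElem_mem _
    · exact (PySem.Chars.endswith_iff _ _).mpr (pvSuffixKeys_suffix _ _ hk)

theorem pvMerge_none_left (c : Option (Int × String)) : pvMerge none c = c := by
  rcases c with _ | ⟨l, v⟩ <;> rfl

theorem pvMerge_assoc (a b c : Option (Int × String)) :
    pvMerge (pvMerge a b) c = pvMerge a (pvMerge b c) := by
  rcases a with _ | ⟨x, u⟩ <;> rcases b with _ | ⟨y, v⟩ <;> rcases c with _ | ⟨z, w⟩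
  all_goals try rfl
  · by_cases h2 : z > y <;> simp [pvMerge, h2]
  · by_cases h1 : y > x <;> by_cases h2 : z > y <;> by_cases h3 : z > x <;>
      simp [pvMerge, h1, h2, h3] <;> omega

theorem pvFoldl_eq_FM (c : String × String → Option (Int × String))
    (d : List (String × String)) (best : Option (Int × String)) :
    d.foldl (fun best kv => pvMerge best (c kv)) best = pvMerge best (pvFM c d) := by
  induction d generalizing best with
  | nil => rcases best with _ | ⟨l, v⟩ <;> rfl
  | cons e es ih => rw [List.foldl_cons, ih, pvFM, ← pvMerge_assoc]

theorem pvFM_congr (c c' : String × String → Option (Int × String))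
    (d : List (String × String)) (h : ∀ e ∈ d, c e = c' e) : pvFM c d = pvFM c' d := by
  induction d with
  | nil => rfl
  | cons e es ih =>
    simp only [pvFM]
    rw [h e (List.mem_cons_self), ih (fun e' he' => h e' (List.mem_cons_of_mem _ he'))]

-- any result of the sub-search carries the length of some key of ss
theorem pvFM_len (ss : List (List Char)) (d : List (String × String)) (l : Int) (v : String)
    (h : pvFM (pvCandS ss) d = some (l, v)) : ∃ k' ∈ ss, l = (k'.length : Int) := by
  induction d generalizing l v with
  | nil => simp [pvFM] at h
  | cons e es ih =>
    rw [pvFM] at h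
    rcases hfm : pvFM (pvCandS ss) es with _ | ⟨l', v'⟩ <;> rw [hfm] at h
    · by_cases he : e.1.toList ∈ ss
      · simp only [pvCandS, if_pos he, pvMerge] at h
        exact ⟨e.1.toList, he, by injection h with h'; injection h' with h1 h2; omega⟩
      · simp [pvCandS, he, pvMerge] at h
    · by_cases he : e.1.toList ∈ ss
      · simp only [pvCandS, if_pos he, pvMerge] at h
        split_ifs at h
        · injection h with h'; injection h' with h1 h2
          obtain ⟨k', hk', hl'⟩ := ih l' v' hfm
          exact ⟨k', hk', by omega⟩
        · exact ⟨e.1.toList, he, by injection h with h'; injection h' with h1 h2; omega⟩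
      · simp only [pvCandS, if_neg he, pvMerge] at h
        injection h with h'; injection h' with h1 h2
        obtain ⟨k', hk', hl'⟩ := ih l' v' hfm
        exact ⟨k', hk', by omega⟩

-- peel the longest key off the sub-search
theorem pvFM_cons (k : List Char) (ks : List (List Char)) (d : List (String × String))
    (hlt : ∀ k' ∈ ks, k'.length < k.length) :
    pvFM (pvCandS (k :: ks)) d
      = match d.find? (fun q => q.1.toList == k) with
        | some e => some ((k.length : Int), e.2)
        | none => pvFM (pvCandS ks) d := by
  induction d with
  | nil => simp [pvFM, List.find?]
  | cons e es ih =>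
    by_cases hek : e.1.toList = k
    · have hfind : (e :: es).find? (fun q => q.1.toList == k) = some e := by
        simp [hek]
      rw [hfind, pvFM]
      have hc : pvCandS (k :: ks) e = some ((k.length : Int), e.2) := by
        simp [pvCandS, List.mem_cons, hek]
      rw [hc]
      rcases hfm : pvFM (pvCandS (k :: ks)) es with _ | ⟨l', v'⟩
      · rfl
      · obtain ⟨k', hk', hl'⟩ := pvFM_len _ _ _ _ hfm
        have hngt : ¬ (l' > (k.length : Int)) := by
          rcases List.mem_cons.mp hk' with h | h
          · rw [hl', h]; omega
          · have hlt2 : (k'.length : Int) < (k.length : Int) := by exact_mod_cast hlt k' h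
            rw [hl']; omega
        simp [pvMerge, hngt]
    · rw [pvFM]
      have hfind : (e :: es).find? (fun q => q.1.toList == k)
          = es.find? (fun q => q.1.toList == k) := by
        simp [hek]
      have hc : pvCandS (k :: ks) e = pvCandS ks e := by
        by_cases he : e.1.toList ∈ ks <;> simp [pvCandS, List.mem_cons, hek, he]
      rw [hfind, hc, ih]
      rcases hfe : es.find? (fun q => q.1.toList == k) with _ | e' <;> rw [hfe]
      · simp only [pvFM]
      · by_cases he : e.1.toList ∈ ks
        · have hgt : (k.length : Int) > (e.1.toList.length : Int) := by
            exact_mod_cast hlt _ he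
          simp only [pvCandS, if_pos he, pvMerge]
          rw [if_pos hgt]
        · simp [pvCandS, he, pvMerge]

theorem pvFindB_eq_FM (ss : List (List Char)) (d : List (String × String))
    (hp : ss.Pairwise (fun a b => b.length < a.length)) :
    pvFindB d ss = (pvFM (pvCandS ss) d).map (·.2) := by
  induction ss with
  | nil =>
    have hnil : ∀ d' : List (String × String), pvFM (pvCandS ([] : List (List Char))) d' = none := by
      intro d'
      induction d' with
      | nil => rfl
      | cons e es ih2 =>
        rw [pvFM, show pvCandS ([] : List (List Char)) e = none from by simp [pvCandS],
          pvMerge_none_left, ih2]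
    simp [pvFindB, hnil]
  | cons k ks ih =>
    rw [List.pairwise_cons] at hp
    rw [pvFindB, pvGet, pvFM_cons k ks d hp.1]
    rcases hf : d.find? (fun q => q.1.toList == k) with _ | e <;> rw [hf]
    · simpa using ih hp.2
    · simp

-- ===== VERDICT (by name: the statement is the Claim_ definition above) =====
theorem resolve_newrel_for_repo_rel_spec : Claim_equal_resolve_newrel_for_repo_rel := by
  intro rel d _
  show resolve_newrel_for_repo_rel rel d = resolve_newrel_for_repo_rel_alt rel d
  simp only [resolve_newrel_for_repo_rel, resolve_newrel_for_repo_rel_alt]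
  set parts := PySem.Chars.splitOn (PySem.Chars.replace rel.toList ['/'] ['\\']) ['\\'] with hparts
  set full := pvNorm (PySem.Chars.join ['\\'] parts) with hfull
  -- A's loop searches the normalized suffixes longest-first
  have hA := pvLoopA_eq parts d 0
  simp only [Nat.cast_zero, List.drop_zero] at hA
  rw [hA]
  -- B's second loop is a fold of pvMerge over per-entry candidates
  have hbody : (fun (best : Option (Int × String)) (kv : String × String) =>
      if ((full.length : Int) - (kv.1.toList.length : Int))
            ∈ (parts.foldl
                (fun (st : Int × PySem.Set Int) p =>
                  (st.1 + ((pvNorm p).length : Int) + 1, PySem.Set.add st.2 st.1))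
                ((0 : Int), PySem.Set.empty)).2
          ∧ PySem.Chars.endswith full kv.1.toList = true then
        match best with
        | none => some ((kv.1.toList.length : Int), kv.2)
        | some (b, u) =>
          if (kv.1.toList.length : Int) > b then some ((kv.1.toList.length : Int), kv.2)
          else some (b, u)
      else best)
      = (fun best kv => pvMerge best
          (if ((full.length : Int) - (kv.1.toList.length : Int))
                ∈ (parts.foldl
                    (fun (st : Int × PySem.Set Int) p =>
                      (st.1 + ((pvNorm p).length : Int) + 1, PySem.Set.add st.2 st.1))
                    ((0 : Int), PySem.Set.empty)).2
              ∧ PySem.Chars.endswith full kv.1.toList = true then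
            some ((kv.1.toList.length : Int), kv.2)
          else none)) := by
    funext best kv
    by_cases h : ((full.length : Int) - (kv.1.toList.length : Int))
          ∈ (parts.foldl
              (fun (st : Int × PySem.Set Int) p =>
                (st.1 + ((pvNorm p).length : Int) + 1, PySem.Set.add st.2 st.1))
              ((0 : Int), PySem.Set.empty)).2
        ∧ PySem.Chars.endswith full kv.1.toList = true
    · simp only [if_pos h]; rcases best with _ | ⟨b, u⟩ <;> rfl
    · simp only [if_neg h]; rcases best with _ | ⟨b, u⟩ <;> rfl
  rw [hbody, pvFoldl_eq_FM, pvMerge_none_left]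
  -- the per-entry candidate test is exactly membership in the suffix-key list
  have hcand : ∀ kv : String × String,
      (if ((full.length : Int) - (kv.1.toList.length : Int))
            ∈ (parts.foldl
                (fun (st : Int × PySem.Set Int) p =>
                  (st.1 + ((pvNorm p).length : Int) + 1, PySem.Set.add st.2 st.1))
                ((0 : Int), PySem.Set.empty)).2
          ∧ PySem.Chars.endswith full kv.1.toList = true then
        some ((kv.1.toList.length : Int), kv.2)
      else none) = pvCandS (pvSuffixKeys parts) kv := by
    intro kv
    rw [pvCandS]
    refine if_congr ?_ rfl rfl
    rw [pvBoundsFold_mem]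
    constructor
    · rintro ⟨hm, he⟩
      rcases hm with hm | hm
      · exact absurd hm (by simp [PySem.Set.empty])
      · exact (pvMatch_iff parts kv.1.toList).mp ⟨hm, he⟩
    · intro hk
      obtain ⟨hm, he⟩ := (pvMatch_iff parts kv.1.toList).mpr hk
      exact ⟨Or.inr hm, he⟩
  have hFMeq : pvFM (fun kv =>
      (if ((full.length : Int) - (kv.1.toList.length : Int))
            ∈ (parts.foldl
                (fun (st : Int × PySem.Set Int) p =>
                  (st.1 + ((pvNorm p).length : Int) + 1, PySem.Set.add st.2 st.1))
                ((0 : Int), PySem.Set.empty)).2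
          ∧ PySem.Chars.endswith full kv.1.toList = true then
        some ((kv.1.toList.length : Int), kv.2)
      else none)) d = pvFM (pvCandS (pvSuffixKeys parts)) d :=
    pvFM_congr _ _ d (fun e _ => hcand e)
  rw [hFMeq, ← pvFindB_eq_FM (pvSuffixKeys parts) d (pvSuffixKeys_pairwise parts)]
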